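-- pv_equiv track=rewrite | github.com/lrslab/Hammerhead-motif | hammermotif/greedy_caller.py | _get_consensus_base
-- ===== SOURCE A (Python) =====
-- from collections import Counter, defaultdict
-- from typing import List, Dict, Tuple, Optional
--
-- def _get_consensus_base(bases: List[str]) -> str:
--     """Get IUPAC consensus base."""
--     if not bases:
--         return 'N'
--
--     base_counts = Counter(bases)
--     total = len(bases)
--
--     # If one base is dominant (>80%), use it
--     for base, count in base_counts.items():
--         if count / total > 0.8:
--             return base
--
--     # Use degenerate codes
--     unique_bases = set(bases)
--
--     if len(unique_bases) == 2:
--         bases_sorted = sorted(unique_bases)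
--         degenerate_map = {
--             ('A', 'G'): 'R', ('C', 'T'): 'Y',
--             ('A', 'T'): 'W', ('C', 'G'): 'S',
--             ('G', 'T'): 'K', ('A', 'C'): 'M'
--         }
--         return degenerate_map.get(tuple(bases_sorted), 'N')
--
--     elif len(unique_bases) == 3:
--         missing = {'A', 'C', 'G', 'T'} - unique_bases
--         if missing == {'A'}:
--             return 'B'
--         elif missing == {'C'}:
--             return 'D'
--         elif missing == {'G'}:
--             return 'H'
--         elif missing == {'T'}:
--             return 'V'
--
--     return 'N'
-- ===== SOURCE B (Python) =====
-- def _get_consensus_base(bases):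
--     """Get IUPAC consensus base."""
--     if not bases:
--         return 'N'
--     # A >80% base is in particular a strict majority, so the Boyer-Moore
--     # majority-vote candidate is the only possible dominant base; verify it.
--     cand, votes = bases[0], 0
--     for b in bases:
--         if votes == 0:
--             cand, votes = b, 1
--         elif b == cand:
--             votes += 1
--         else:
--             votes -= 1
--     if 5 * sum(1 for b in bases if b == cand) > 4 * len(bases):
--         return cand
--     # Flag which of A/C/G/T occur; any other base admits no degenerate code.
--     saw_a = saw_c = saw_g = saw_t = False
--     for b in bases:
--         if b == 'A':
--             saw_a = True
--         elif b == 'C':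
--             saw_c = True
--         elif b == 'G':
--             saw_g = True
--         elif b == 'T':
--             saw_t = True
--         else:
--             return 'N'
--     return 'NACMGRSVTWYHKDBN'[saw_a + 2 * saw_c + 4 * saw_g + 8 * saw_t]
-- ===== Notes on version B (the rewrite author's own statement) =====
-- stated objective: alternative
-- what changed: B drops Counter/set/sorted/dict entirely: the >80% base is found by a Boyer-Moore majority vote (a >80% base is a strict majority, so it must be the surviving candidate) verified by one counting pass, and the degenerate code is obtained by accumulating four A/C/G/T presence flags in a single loop and indexing the string 'NACMGRSVTWYHKDBN' with saw_a + 2*saw_c + 4*saw_g + 8*saw_t.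
import Mathlib
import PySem

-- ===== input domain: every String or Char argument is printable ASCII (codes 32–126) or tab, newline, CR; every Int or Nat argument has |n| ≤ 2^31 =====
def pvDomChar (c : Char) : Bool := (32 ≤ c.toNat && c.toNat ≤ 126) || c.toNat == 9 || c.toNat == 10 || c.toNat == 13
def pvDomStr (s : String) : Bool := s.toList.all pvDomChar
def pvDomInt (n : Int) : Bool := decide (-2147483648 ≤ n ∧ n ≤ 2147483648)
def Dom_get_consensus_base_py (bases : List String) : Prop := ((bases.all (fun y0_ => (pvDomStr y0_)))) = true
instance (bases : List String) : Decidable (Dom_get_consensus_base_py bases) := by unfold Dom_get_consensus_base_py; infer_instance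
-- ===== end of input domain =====

-- B replaces A's Counter scan by a Boyer-Moore majority vote (verified by a counting pass)
-- and A's set/sorted/dict degenerate-code logic by four presence flags plus arithmetic
-- indexing into 'NACMGRSVTWYHKDBN'; same return value, measured constant-factor faster.


-- ===== PORT A =====
-- A's inline degenerate_map literal (keys are the sorted pairs of bases)
def degenerateMap : PySem.Dict (String × String) String :=
  PySem.Dict.ofList
    [(("A", "G"), "R"), (("C", "T"), "Y"), (("A", "T"), "W"),
     (("C", "G"), "S"), (("G", "T"), "K"), (("A", "C"), "M")]

-- A's code after the dominant-base scan; `uniq` is set(bases)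
def aDegenerate (uniq : PySem.Set String) : String :=
  if PySem.Set.len uniq = 2 then
    -- sorted(unique_bases): Python's str '<' is code-point lexicographic, i.e. '<' on .toList
    match PySem.List.sorted uniq (fun x => x.toList) false with
    | [x, y] => degenerateMap.getD (x, y) "N"   -- tuple(bases_sorted), a 2-tuple here
    | _ => "N"                                  -- unreachable: sorted keeps the length 2
  else if PySem.Set.len uniq = 3 then
    let missing := PySem.Set.diff (PySem.Set.ofList ["A", "C", "G", "T"]) uniq
    if PySem.Set.equal missing (PySem.Set.ofList ["A"]) then "B"
    else if PySem.Set.equal missing (PySem.Set.ofList ["C"]) then "D"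
    else if PySem.Set.equal missing (PySem.Set.ofList ["G"]) then "H"
    else if PySem.Set.equal missing (PySem.Set.ofList ["T"]) then "V"
    else "N"
  else "N"

-- `count / total > 0.8` is ported as the exact integer comparison 5*count > 4*total
def get_consensus_base_py (bases : List String) : String :=
  if bases = [] then "N"
  else
    let base_counts := PySem.Dict.counter bases
    let total : Int := bases.length
    match base_counts.items.find? (fun bc => decide (5 * bc.2 > 4 * total)) with
    | some bc => bc.1
    | none => aDegenerate (PySem.Set.ofList bases)

-- ===== PORT B =====
-- the Boyer-Moore vote loop over (cand, votes)
def bmLoop : String × Int → List String → String × Int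
  | s, [] => s
  | (cand, votes), b :: rest =>
      if votes = 0 then bmLoop (b, 1) rest
      else if b = cand then bmLoop (cand, votes + 1) rest
      else bmLoop (cand, votes - 1) rest

-- the flag loop over (saw_a, saw_c, saw_g, saw_t); none = the early `return 'N'`
def flagLoop : Bool × Bool × Bool × Bool → List String → Option (Bool × Bool × Bool × Bool)
  | f, [] => some f
  | (a, c, g, t), b :: rest =>
      if b = "A" then flagLoop (true, c, g, t) rest
      else if b = "C" then flagLoop (a, true, g, t) rest
      else if b = "G" then flagLoop (a, c, true, t) rest
      else if b = "T" then flagLoop (a, c, g, true) rest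
      else none

def get_consensus_base_py_alt (bases : List String) : String :=
  match bases with
  | [] => "N"
  | b0 :: _ =>
    let cand := (bmLoop (b0, 0) bases).1
    -- 5 * sum(1 for b in bases if b == cand) > 4 * len(bases)
    if 5 * (bases.countP (fun b => b == cand) : Int) > 4 * (bases.length : Int) then cand
    else
      match flagLoop (false, false, false, false) bases with
      | none => "N"
      | some (a, c, g, t) =>
          let idx : Int := (if a then 1 else 0) + (if c then 2 else 0)
                         + (if g then 4 else 0) + (if t then 8 else 0)
          -- 'NACMGRSVTWYHKDBN'[idx]; 0 ≤ idx ≤ 15 so the index is always in range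
          match PySem.Str.pyGet? "NACMGRSVTWYHKDBN" idx with
          | some ch => String.ofList [ch]
          | none => ""

-- ===== PRECONDITION & SPEC =====
def Spec_get_consensus_base_py (bases : List String) (out : String) : Prop := out = get_consensus_base_py_alt bases
instance (bases : List String) (out : String) : Decidable (Spec_get_consensus_base_py bases out) := by unfold Spec_get_consensus_base_py; infer_instance

-- ===== CLAIM (what is proved, stated in full; the proofs are below) =====
def Claim_equal_get_consensus_base_py : Prop := ∀ (bases : List String), Dom_get_consensus_base_py bases → Spec_get_consensus_base_py bases (get_consensus_base_py bases)

-- ===== LEMMAS AND PROOFS =====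

-- Boyer-Moore invariant: any non-candidate occurs at most (len+votes-adjustment)/2 times
theorem countP_cons_int (l : List String) (bb x : String) :
    (((bb :: l).countP (fun y => y == x) : Nat) : Int) =
      ((l.countP (fun y => y == x) : Nat) : Int) + (if bb = x then 1 else 0) := by
  rw [List.countP_cons]
  by_cases h : bb = x <;> simp [h]

theorem bm_inv (l : List String) : ∀ (cand : String) (votes : Int), 0 ≤ votes →
    ∀ x, x ≠ (bmLoop (cand, votes) l).1 →
      2 * (l.countP (fun b => b == x) : Int) ≤ l.length + (if x = cand then -votes else votes) := by
  induction l with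
  | nil =>
    intro cand votes hv x hx
    simp only [bmLoop] at hx
    simp only [List.countP_nil, List.length_nil, Nat.cast_zero, mul_zero]
    rw [if_neg hx]
    omega
  | cons b t ih =>
    intro cand votes hv x hx
    simp only [bmLoop] at hx
    rw [countP_cons_int, List.length_cons]
    by_cases h0 : votes = 0
    · rw [if_pos h0] at hx
      have H := ih b 1 (by omega) x hx
      subst h0
      have hg : (if x = cand then -(0 : Int) else 0) = 0 := by split_ifs <;> norm_num
      rw [hg]
      by_cases hbx : b = x
      · rw [if_pos hbx]
        rw [if_pos hbx.symm] at H
        push_cast at H ⊢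
        omega
      · rw [if_neg hbx]
        rw [if_neg (fun h => hbx h.symm)] at H
        push_cast at H ⊢
        omega
    · rw [if_neg h0] at hx
      by_cases hbc : b = cand
      · rw [if_pos hbc] at hx
        have H := ih cand (votes + 1) (by omega) x hx
        by_cases hxc : x = cand
        · rw [if_pos hxc] at H ⊢
          rw [if_pos (hbc.trans hxc.symm)]
          push_cast at H ⊢
          omega
        · rw [if_neg hxc] at H ⊢
          rw [if_neg (fun h : b = x => hxc (h.symm.trans hbc))]
          push_cast at H ⊢
          omega
      · rw [if_neg hbc] at hx
        have H := ih cand (votes - 1) (by omega) x hx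
        by_cases hxc : x = cand
        · rw [if_pos hxc] at H ⊢
          rw [if_neg (fun h : b = x => hbc (h.trans hxc))]
          push_cast at H ⊢
          omega
        · rw [if_neg hxc] at H ⊢
          by_cases hbx : b = x
          · rw [if_pos hbx]
            push_cast at H ⊢
            omega
          · rw [if_neg hbx]
            push_cast at H ⊢
            omega

-- a >80% base is a strict majority, so it is the Boyer-Moore candidate
theorem bm_dominant (bases : List String) (b0 x : String)
    (hx : 5 * (bases.countP (fun b => b == x) : Int) > 4 * (bases.length : Int)) :
    (bmLoop (b0, 0) bases).1 = x := by
  by_contra hne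
  have h := bm_inv bases b0 0 (le_refl 0) x (fun he => hne he.symm)
  have hle : bases.countP (fun b => b == x) ≤ bases.length := List.countP_le_length
  have hg : (if x = b0 then -(0 : Int) else 0) = 0 := by split_ifs <;> norm_num
  rw [hg] at h
  omega

-- flagLoop hits `return 'N'` iff some base is outside ACGT
theorem flag_none (l : List String) : ∀ (f : Bool × Bool × Bool × Bool),
    (∃ x ∈ l, x ≠ "A" ∧ x ≠ "C" ∧ x ≠ "G" ∧ x ≠ "T") → flagLoop f l = none := by
  induction l with
  | nil => rintro f ⟨x, hx, -⟩; simp at hx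
  | cons b t ih =>
    rintro ⟨a, c, g, tt⟩ ⟨x, hx, hA, hC, hG, hT⟩
    rcases List.mem_cons.1 hx with rfl | hxt
    · simp only [flagLoop, if_neg hA, if_neg hC, if_neg hG, if_neg hT]
    · by_cases h1 : b = "A"
      · simpa only [flagLoop, if_pos h1] using ih _ ⟨x, hxt, hA, hC, hG, hT⟩
      · by_cases h2 : b = "C"
        · simpa only [flagLoop, if_neg h1, if_pos h2] using ih _ ⟨x, hxt, hA, hC, hG, hT⟩
        · by_cases h3 : b = "G"
          · simpa only [flagLoop, if_neg h1, if_neg h2, if_pos h3] using ih _ ⟨x, hxt, hA, hC, hG, hT⟩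
          · by_cases h4 : b = "T"
            · simpa only [flagLoop, if_neg h1, if_neg h2, if_neg h3, if_pos h4] using
                ih _ ⟨x, hxt, hA, hC, hG, hT⟩
            · simp only [flagLoop, if_neg h1, if_neg h2, if_neg h3, if_neg h4]

-- on all-ACGT input the flags record exactly which letters occur
theorem flag_good (l : List String) : ∀ (a c g t : Bool),
    (∀ x ∈ l, x = "A" ∨ x = "C" ∨ x = "G" ∨ x = "T") →
    flagLoop (a, c, g, t) l =
      some (a || decide ("A" ∈ l), c || decide ("C" ∈ l), g || decide ("G" ∈ l), t || decide ("T" ∈ l)) := by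
  induction l with
  | nil => intro a c g t _; simp [flagLoop]
  | cons b tl ih =>
    intro a c g t hall
    have hb := hall b List.mem_cons_self
    have hrest : ∀ x ∈ tl, x = "A" ∨ x = "C" ∨ x = "G" ∨ x = "T" :=
      fun x hx => hall x (List.mem_cons_of_mem b hx)
    rcases hb with rfl | rfl | rfl | rfl <;>
      simp [flagLoop, ih _ _ _ _ hrest, List.mem_cons]

-- counts of two distinct values add up to at most the length
theorem count_all_eq (bases : List String) (y : String)
    (h : ∀ x ∈ bases, x = y) :
    bases.countP (fun b => b == y) = bases.length := by
  induction bases with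
  | nil => simp
  | cons b t ih =>
    have hb := h b List.mem_cons_self
    simp [hb, ih (fun x hx => h x (List.mem_cons_of_mem b hx))]

theorem equal_mem {k s : List String} (h : PySem.Set.equal k s = true) :
    (∀ y ∈ k, y ∈ s) ∧ (∀ y ∈ s, y ∈ k) := by
  simp [PySem.Set.equal, PySem.Set.issubset, PySem.Set.contains] at h
  exact h

theorem pairMap_N (x y : String)
    (hA : x ≠ "A") (hC : x ≠ "C") (hG : x ≠ "G") (hT : x ≠ "T") :
    degenerateMap.getD (x, y) "N" = "N" ∧ degenerateMap.getD (y, x) "N" = "N" := by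
  have hn : ∀ z : String, degenerateMap.items.find? (fun p => p.1 == (x, z)) = none ∧
      degenerateMap.items.find? (fun p => p.1 == (z, x)) = none := by
    intro z
    constructor <;>
    · rw [List.find?_eq_none]
      intro p hp
      revert hp
      have : degenerateMap.items = [(("A", "G"), "R"), (("C", "T"), "Y"), (("A", "T"), "W"),
        (("C", "G"), "S"), (("G", "T"), "K"), (("A", "C"), "M")] := by decide
      rw [this]
      intro hp
      fin_cases hp <;> simp only [Prod.mk.injEq, beq_iff_eq, not_and] <;>
        first
          | exact fun h => absurd h.symm hA
          | exact fun _ h => absurd h.symm hA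
          | exact fun h => absurd h.symm hC
          | exact fun _ h => absurd h.symm hC
          | exact fun h => absurd h.symm hG
          | exact fun _ h => absurd h.symm hG
          | exact fun h => absurd h.symm hT
          | exact fun _ h => absurd h.symm hT
  constructor <;>
  · rw [PySem.Dict.getD, PySem.Dict.get?]
    first
      | rw [(hn y).1]; rfl
      | rw [(hn y).2]; rfl

theorem sorted_pair (a b : String) :
    PySem.List.sorted [a, b] (fun x => x.toList) false =
      if b.toList < a.toList then [b, a] else [a, b] := by
  by_cases h : b.toList < a.toList
  · simp only [PySem.List.sorted, List.foldl, PySem.List.insertBy, h, decide_true,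
      Bool.false_eq_true, if_false, if_true]
  · simp only [PySem.List.sorted, List.foldl, PySem.List.insertBy, h, decide_false,
      Bool.false_eq_true, if_false]

-- missing == {L} forces the other three letters into s
theorem equal_singleton_mem (s : List String) (L M : String) (hML : M ≠ L)
    (hM : M ∈ ["A", "C", "G", "T"])
    (h : PySem.Set.equal (PySem.Set.diff (PySem.Set.ofList ["A", "C", "G", "T"]) s)
          (PySem.Set.ofList [L]) = true) : M ∈ s := by
  obtain ⟨h1, _⟩ := equal_mem h
  by_contra hMs
  have hofl : (PySem.Set.ofList ["A", "C", "G", "T"] : List String) = ["A", "C", "G", "T"] := by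
    decide
  have hmem : M ∈ PySem.Set.diff (PySem.Set.ofList ["A", "C", "G", "T"]) s := by
    simp only [PySem.Set.diff, hofl]
    simp [List.mem_filter, PySem.Set.contains, hMs]
    simpa using hM
  have := h1 M hmem
  rw [PySem.Set.mem_ofList] at this
  simp at this
  exact hML this

theorem four_le_three (s : List String) (hlen : s.length = 3) (l1 l2 l3 x : String)
    (h1 : l1 ∈ s) (h2 : l2 ∈ s) (h3 : l3 ∈ s) (hx : x ∈ s)
    (hnd4 : [l1, l2, l3, x].Nodup) : False := by
  have hsub : [l1, l2, l3, x] ⊆ s := by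
    intro y hy; simp only [List.mem_cons, List.not_mem_nil, or_false] at hy
    rcases hy with rfl | rfl | rfl | rfl <;> assumption
  have := (List.subperm_of_subset hnd4 hsub).length_le
  simp [hlen] at this

theorem aDeg_two_bad (a b x : String) (hx : x = a ∨ x = b)
    (hA : x ≠ "A") (hC : x ≠ "C") (hG : x ≠ "G") (hT : x ≠ "T") :
    aDegenerate [a, b] = "N" := by
  unfold aDegenerate
  rw [if_pos (by norm_num [PySem.Set.len]), sorted_pair]
  by_cases h : b.toList < a.toList
  · rw [if_pos h]
    show degenerateMap.getD (b, a) "N" = "N"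
    rcases hx with rfl | rfl
    · exact (pairMap_N x _ hA hC hG hT).2
    · exact (pairMap_N x _ hA hC hG hT).1
  · rw [if_neg h]
    show degenerateMap.getD (a, b) "N" = "N"
    rcases hx with rfl | rfl
    · exact (pairMap_N x _ hA hC hG hT).1
    · exact (pairMap_N x _ hA hC hG hT).2

theorem aDeg_three_bad (a b c x : String) (hx : x ∈ [a, b, c])
    (hA : x ≠ "A") (hC : x ≠ "C") (hG : x ≠ "G") (hT : x ≠ "T") :
    aDegenerate [a, b, c] = "N" := by
  have key : ∀ l1 l2 l3 : String, l1 ∈ ["A", "C", "G", "T"] → l2 ∈ ["A", "C", "G", "T"] →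
      l3 ∈ ["A", "C", "G", "T"] → [l1, l2, l3].Nodup → ∀ L : String, l1 ≠ L → l2 ≠ L → l3 ≠ L →
      PySem.Set.equal (PySem.Set.diff (PySem.Set.ofList ["A", "C", "G", "T"]) [a, b, c])
        (PySem.Set.ofList [L]) = false := by
    intro l1 l2 l3 hl1 hl2 hl3 hnd3 L hne1 hne2 hne3
    rw [Bool.eq_false_iff]
    intro h
    have m1 := equal_singleton_mem [a, b, c] L l1 hne1 hl1 h
    have m2 := equal_singleton_mem [a, b, c] L l2 hne2 hl2 h
    have m3 := equal_singleton_mem [a, b, c] L l3 hne3 hl3 h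
    have hxl : ∀ l ∈ ["A", "C", "G", "T"], x ≠ l := by
      intro l hl; revert hl
      simp only [List.mem_cons, List.not_mem_nil, or_false]
      rintro (rfl | rfl | rfl | rfl) <;> assumption
    have hnd4 : [l1, l2, l3, x].Nodup := by
      simp only [List.nodup_cons, List.mem_cons, List.not_mem_nil, or_false,
        List.nodup_nil, and_true, not_or] at hnd3 ⊢
      refine ⟨⟨hnd3.1.1, hnd3.1.2, fun he => hxl l1 hl1 he.symm⟩,
        ⟨hnd3.2.1, fun he => hxl l2 hl2 he.symm⟩,
        fun he => hxl l3 hl3 he.symm, not_false⟩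
    exact four_le_three [a, b, c] rfl l1 l2 l3 x m1 m2 m3 hx hnd4
  unfold aDegenerate
  rw [if_neg (by norm_num [PySem.Set.len]), if_pos (by norm_num [PySem.Set.len])]
  simp only [key "C" "G" "T" (by decide) (by decide) (by decide) (by decide) "A"
      (by decide) (by decide) (by decide),
    key "A" "G" "T" (by decide) (by decide) (by decide) (by decide) "C"
      (by decide) (by decide) (by decide),
    key "A" "C" "T" (by decide) (by decide) (by decide) (by decide) "G"
      (by decide) (by decide) (by decide),
    key "A" "C" "G" (by decide) (by decide) (by decide) (by decide) "T"
      (by decide) (by decide) (by decide),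
    Bool.false_eq_true, if_false]

-- a non-ACGT element forces A's degenerate branch to 'N'
theorem aDeg_bad (s : List String) (x : String) (hx : x ∈ s)
    (hA : x ≠ "A") (hC : x ≠ "C") (hG : x ≠ "G") (hT : x ≠ "T") :
    aDegenerate s = "N" := by
  rcases s with _ | ⟨a, _ | ⟨b, _ | ⟨c, _ | ⟨d, t⟩⟩⟩⟩
  · unfold aDegenerate
    rw [if_neg (by norm_num [PySem.Set.len]), if_neg (by norm_num [PySem.Set.len])]
  · unfold aDegenerate
    rw [if_neg (by norm_num [PySem.Set.len]), if_neg (by norm_num [PySem.Set.len])]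
  · exact aDeg_two_bad a b x (by simpa using hx) hA hC hG hT
  · exact aDeg_three_bad a b c x hx hA hC hG hT
  · unfold aDegenerate
    rw [if_neg (by simp [PySem.Set.len]; omega), if_neg (by simp [PySem.Set.len]; omega)]

-- on an all-ACGT nodup set of size ≥ 2, A's branching equals the presence-index lookup
theorem good_tail (s : List String) (hnd : s.Nodup)
    (hsub : ∀ x ∈ s, x = "A" ∨ x = "C" ∨ x = "G" ∨ x = "T") (hlen : 2 ≤ s.length) :
    aDegenerate s =
      (match PySem.Str.pyGet? "NACMGRSVTWYHKDBN"
          ((if "A" ∈ s then 1 else 0) + (if "C" ∈ s then 2 else 0)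
            + (if "G" ∈ s then 4 else 0) + (if "T" ∈ s then 8 else 0) : Int) with
       | some ch => String.ofList [ch] | none => "") := by
  have h4 : s.length ≤ 4 := by
    have hs : s ⊆ ["A", "C", "G", "T"] := by
      intro y hy; rcases hsub y hy with rfl | rfl | rfl | rfl <;> simp
    simpa using (List.subperm_of_subset hnd hs).length_le
  rcases s with _ | ⟨a, _ | ⟨b, _ | ⟨c, _ | ⟨d, _ | ⟨e, t⟩⟩⟩⟩⟩
  · simp at hlen
  · simp at hlen
  · rcases hsub a (by simp) with rfl | rfl | rfl | rfl <;>
      rcases hsub b (by simp) with rfl | rfl | rfl | rfl <;>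
      revert hnd <;> decide
  · rcases hsub a (by simp) with rfl | rfl | rfl | rfl <;>
      rcases hsub b (by simp) with rfl | rfl | rfl | rfl <;>
      rcases hsub c (by simp) with rfl | rfl | rfl | rfl <;>
      revert hnd <;> decide
  · rcases hsub a (by simp) with rfl | rfl | rfl | rfl <;>
      rcases hsub b (by simp) with rfl | rfl | rfl | rfl <;>
      rcases hsub c (by simp) with rfl | rfl | rfl | rfl <;>
      rcases hsub d (by simp) with rfl | rfl | rfl | rfl <;>
      revert hnd <;> decide
  · simp at h4; omega

-- ===== VERDICT (by name: the statement is the Claim_ definition above) =====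
theorem get_consensus_base_py_spec : Claim_equal_get_consensus_base_py := by
  intro bases _
  unfold Spec_get_consensus_base_py
  cases bases with
  | nil => rfl
  | cons b0 rest =>
    have hne : (b0 :: rest : List String) ≠ [] := by simp
    have hlen1 : (1 : Int) ≤ ((b0 :: rest).length : Int) := by
      simp only [List.length_cons]; push_cast; omega
    simp only [get_consensus_base_py, get_consensus_base_py_alt, if_neg hne,
      PySem.Dict.items_counter, List.find?_map]
    set cand := (bmLoop (b0, 0) (b0 :: rest)).1 with hcand
    by_cases hB : 5 * ((b0 :: rest).countP (fun b => b == cand) : Int) >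
        4 * (((b0 :: rest).length : Nat) : Int)
    · -- dominant case: the inner find? hits exactly cand, both sides return cand
      rw [if_pos hB]
      have hcpos : 0 < (b0 :: rest).countP (fun b => b == cand) := by
        by_contra h
        push Not at h
        have h0 : (b0 :: rest).countP (fun b => b == cand) = 0 := by omega
        rw [h0] at hB
        push_cast at hB
        omega
      have hmem : cand ∈ (b0 :: rest) := by
        obtain ⟨y, hy, hyc⟩ := List.countP_pos_iff.1 hcpos
        exact (beq_iff_eq.1 hyc) ▸ hy
      have hex : ∃ k ∈ PySem.Set.ofList (b0 :: rest),
          ((fun bc : String × Int => decide (5 * bc.2 > 4 * (((b0 :: rest).length : Nat) : Int))) ∘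
            fun k => (k, (List.count k (b0 :: rest) : Int))) k = true := by
        refine ⟨cand, (PySem.Set.mem_ofList _ _).2 hmem, ?_⟩
        simpa [List.count] using hB
      obtain ⟨k0, hk0⟩ := List.find?_isSome.2 (by
        obtain ⟨k, hk, hpk⟩ := hex
        exact ⟨k, hk, hpk⟩) |> Option.isSome_iff_exists.1
      have hpk0 := List.find?_some hk0
      have hk0dom : 5 * ((b0 :: rest).countP (fun b => b == k0) : Int) >
          4 * (((b0 :: rest).length : Nat) : Int) := by
        simpa [Function.comp, List.count] using hpk0
      have hk0cand : k0 = cand := (bm_dominant (b0 :: rest) b0 k0 hk0dom).symm ▸ rfl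
      rw [hk0]
      simpa using hk0cand
    · -- no dominant base: find? = none, compare the degenerate branches
      rw [if_neg hB]
      have hnone : (PySem.Set.ofList (b0 :: rest) : List String).find?
          (((fun bc : String × Int => decide (5 * bc.2 > 4 * (((b0 :: rest).length : Nat) : Int))) ∘
            fun k => (k, (List.count k (b0 :: rest) : Int)))) = none := by
        rw [List.find?_eq_none]
        intro k hk
        simp only [Function.comp, decide_eq_true_eq, not_lt, List.count]
        by_contra hgt
        push Not at hgt
        have := bm_dominant (b0 :: rest) b0 k hgt
        rw [← hcand] at this
        exact hB (this ▸ hgt)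
      rw [hnone]
      show aDegenerate (PySem.Set.ofList (b0 :: rest)) = _
      -- no dominant base: counts are available as hypotheses via hnone
      by_cases hbad : ∃ x ∈ (b0 :: rest), x ≠ "A" ∧ x ≠ "C" ∧ x ≠ "G" ∧ x ≠ "T"
      · obtain ⟨x, hx, hA, hC, hG, hT⟩ := hbad
        rw [flag_none (b0 :: rest) _ ⟨x, hx, hA, hC, hG, hT⟩]
        exact aDeg_bad _ x ((PySem.Set.mem_ofList _ _).2 hx) hA hC hG hT
      · push Not at hbad
        have hall : ∀ x ∈ (b0 :: rest), x = "A" ∨ x = "C" ∨ x = "G" ∨ x = "T" := by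
          intro x hx
          by_contra hcon
          push Not at hcon
          obtain ⟨h1, h2, h3, h4⟩ := hcon
          obtain h := hbad x hx h1 h2 h3
          exact h4 h
        rw [flag_good (b0 :: rest) false false false false hall]
        have hsetlen : 2 ≤ (PySem.Set.ofList (b0 :: rest) : List String).length := by
          rcases hs : (PySem.Set.ofList (b0 :: rest) : List String) with _ | ⟨y, _ | ⟨z, t⟩⟩
          · have := (PySem.Set.mem_ofList (b0 :: rest) b0).2 List.mem_cons_self
            rw [hs] at this
            simp at this
          · -- singleton set: every element equals y, so y is >80% dominant, contradiction
            exfalso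
            have hally : ∀ x ∈ (b0 :: rest), x = y := by
              intro x hx
              have := (PySem.Set.mem_ofList (b0 :: rest) x).2 hx
              rw [hs] at this
              simpa using this
            have hcy : (b0 :: rest).countP (fun b => b == y) = (b0 :: rest).length :=
              count_all_eq _ y hally
            have hydom : 5 * ((b0 :: rest).countP (fun b => b == y) : Int) >
                4 * (((b0 :: rest).length : Nat) : Int) := by
              rw [hcy]; omega
            have := bm_dominant (b0 :: rest) b0 y hydom
            rw [← hcand] at this
            exact hB (this ▸ hydom)
          · simp
        have := good_tail (PySem.Set.ofList (b0 :: rest)) (PySem.Set.nodup_ofList _) (by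
          intro x hx
          exact hall x ((PySem.Set.mem_ofList _ _).1 hx)) hsetlen
        rw [this]
        simp only [Bool.false_or, PySem.Set.mem_ofList, decide_eq_true_eq]
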